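-- pv_equiv track=rewrite | github.com/matus-ruscak/AdventOfCode | advent_of_code_2023/aoc_day_14b.py | get_final_upstream_position
-- ===== SOURCE A (Python) =====
-- def get_final_upstream_position(current_index, line):
--     if current_index == (len(line) - 1):
--         return len(line) - 1
--     current_index = current_index + 1
--     upstream_character = line[current_index]
--     if upstream_character in ('O', '#'):
--         return current_index - 1
--     else:
--         return get_final_upstream_position(current_index, line)
-- ===== SOURCE B (Python) =====
-- def get_final_upstream_position(current_index, line):
--     n = len(line)
--     if current_index == n - 1:
--         return n - 1
--     for j in range(current_index + 1, n):
--         if line[j] in ('O', '#'):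
--             return j - 1
--     return n - 1
-- ===== Notes on version B (the rewrite author's own statement) =====
-- stated objective: simpler
-- what changed: Replaces A's tail recursion with per-call start guard by a single forward scan over range(current_index+1, len(line)) that returns j-1 at the first blocker and len(line)-1 if none is found.
import Mathlib
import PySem

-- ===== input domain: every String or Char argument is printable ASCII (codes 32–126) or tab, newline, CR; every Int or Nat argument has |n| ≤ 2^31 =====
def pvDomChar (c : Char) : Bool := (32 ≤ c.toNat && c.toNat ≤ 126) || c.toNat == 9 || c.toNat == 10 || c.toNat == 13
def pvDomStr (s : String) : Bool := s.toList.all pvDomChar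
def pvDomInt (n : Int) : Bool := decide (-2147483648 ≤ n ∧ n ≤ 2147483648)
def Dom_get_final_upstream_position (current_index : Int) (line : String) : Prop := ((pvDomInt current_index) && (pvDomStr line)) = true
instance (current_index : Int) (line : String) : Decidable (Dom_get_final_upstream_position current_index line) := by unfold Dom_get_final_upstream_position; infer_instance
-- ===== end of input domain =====

-- B replaces A's tail recursion by a single forward scan over range(current_index+1, len(line)); simpler, same O(n) cost.

-- ===== PORT A =====
-- literal transliteration of A's tail recursion; where Python raises IndexError
-- (line[current_index+1] out of range, incl. below -len) the port returns 0 — excluded by Pre_.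
def get_final_upstream_position (current_index : Int) (line : String) : Int :=
  if current_index = PySem.Str.len line - 1 then PySem.Str.len line - 1
  else
    match h : PySem.List.pyGet? line.toList (current_index + 1) with
    | none => 0  -- IndexError in Python; outside Pre_
    | some upstream_character =>
      if upstream_character = 'O' ∨ upstream_character = '#' then (current_index + 1) - 1
      else get_final_upstream_position (current_index + 1) line
termination_by ((line.length : Int) - current_index).toNat
decreasing_by
  have hin : PySem.Raise.InRange line.toList.length (current_index + 1) := by
    by_contra hc
    rw [(PySem.List.pyGet?_eq_none_iff line.toList (current_index + 1)).2 hc] at h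
    simp at h
  unfold PySem.Raise.InRange at hin
  have hl : line.toList.length = line.length := by simp
  omega

-- ===== PORT B =====
-- the for-loop of Source B: scan the index list, return j-1 at the first blocker, else the default.
-- pyGet? j is exact where Python's line[j] succeeds; on none Python raises (outside Pre_) and we return the default.
def pvScanB (cs : List Char) (js : List Int) (dflt : Int) : Int :=
  match js with
  | [] => dflt
  | j :: rest =>
    match PySem.List.pyGet? cs j with
    | none => dflt  -- IndexError in Python; outside Pre_
    | some ch => if ch = 'O' ∨ ch = '#' then j - 1 else pvScanB cs rest dflt

def get_final_upstream_position_alt (current_index : Int) (line : String) : Int :=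
  let n : Int := PySem.Str.len line
  if current_index = n - 1 then n - 1
  else pvScanB line.toList (PySem.List.pyRange (current_index + 1) n 1) (n - 1)

-- ===== PRECONDITION & SPEC =====
-- Pre_ = exactly the inputs on which the Python A returns (outside it line[current_index+1],
-- or a later recursive access, raises IndexError).
def Pre_get_final_upstream_position (current_index : Int) (line : String) : Prop :=
  -((line.length : Int) + 1) ≤ current_index ∧ current_index ≤ (line.length : Int) - 1
instance (current_index : Int) (line : String) : Decidable (Pre_get_final_upstream_position current_index line) := by unfold Pre_get_final_upstream_position; infer_instance

def pvWitness_get_final_upstream_position : Int × String := (0, "..O.")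

def Spec_get_final_upstream_position (current_index : Int) (line : String) (out : Int) : Prop := out = get_final_upstream_position_alt current_index line
instance (current_index : Int) (line : String) (out : Int) : Decidable (Spec_get_final_upstream_position current_index line out) := by unfold Spec_get_final_upstream_position; infer_instance

-- ===== CLAIM (what is proved, stated in full; the proofs are below) =====
def Claim_equal_get_final_upstream_position : Prop := ∀ (current_index : Int) (line : String), Dom_get_final_upstream_position current_index line → Pre_get_final_upstream_position current_index line → Spec_get_final_upstream_position current_index line (get_final_upstream_position current_index line)


-- ===== LEMMAS AND PROOFS =====

-- A's recursion equals B's scan from current_index+1, for every in-range start.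
theorem pv_main (line : String) (k : Nat) :
    ∀ current_index : Int,
      (((line.length : Int) - current_index).toNat ≤ k) →
      -((line.length : Int) + 1) ≤ current_index → current_index ≤ (line.length : Int) - 1 →
      get_final_upstream_position current_index line =
        pvScanB line.toList (PySem.List.pyRange (current_index + 1) (line.length : Int) 1)
          ((line.length : Int) - 1) := by
  induction k with
  | zero =>
    intro c hk h1 h2
    omega
  | succ k ih =>
    intro c hk h1 h2
    rw [get_final_upstream_position.eq_def]
    by_cases hc : c = (line.length : Int) - 1
    · subst hc
      rw [PySem.List.pyRange_one_eq_nil (by omega)]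
      simp [pvScanB]
    · have hlt : c + 1 < (line.length : Int) := by omega
      rw [PySem.List.pyRange_one_cons hlt]
      have hin : PySem.Raise.InRange line.toList.length (c + 1) := by
        unfold PySem.Raise.InRange
        have hl : line.toList.length = line.length := by simp
        omega
      obtain ⟨ch, hch⟩ : ∃ ch, PySem.List.pyGet? line.toList (c + 1) = some ch := by
        cases hop : PySem.List.pyGet? line.toList (c + 1) with
        | none => exact absurd ((PySem.List.pyGet?_eq_none_iff _ _).1 hop) (not_not_intro hin)
        | some ch => exact ⟨ch, rfl⟩
      simp only [PySem.Str.len_eq]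
      have hl : ((line.toList.length : Nat) : Int) = ((line.length : Nat) : Int) := by simp
      rw [hl, if_neg hc]
      simp only [pvScanB, hch]
      split
      · next h' => simp [hch] at h'
      · next ch2 h' =>
          rw [hch] at h'
          injection h' with hcc
          subst hcc
          by_cases hb : ch = 'O' ∨ ch = '#'
          · rw [if_pos hb, if_pos hb]
          · rw [if_neg hb, if_neg hb]
            exact ih (c + 1) (by omega) (by omega) (by omega)

-- ===== VERDICT (by name: the statement is the Claim_ definition above) =====
theorem get_final_upstream_position_spec : Claim_equal_get_final_upstream_position := by
  intro c line _ hpre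
  unfold Spec_get_final_upstream_position get_final_upstream_position_alt
  obtain ⟨h1, h2⟩ := hpre
  rw [pv_main line ((line.length : Int) - c).toNat c (le_refl _) h1 h2]
  by_cases hc : c = (line.length : Int) - 1
  · subst hc
    rw [PySem.List.pyRange_one_eq_nil (by simp)]
    simp [pvScanB]
  · simp [hc]
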